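-- pv_equiv track=rewrite | github.com/Fishcuit/AhluicSim | sim3.py | check_grid_sizes
-- ===== SOURCE A (Python) =====
-- def check_grid_sizes(grid, clusters):
--     sizes = [2, 4, 6]
--     # Adjust the indices to cover the correct area
--     grid_positions = [(2, 4), (1, 5), (0, 6)]
--     counts = []
--     for size, (min_row_col, max_row_col) in zip(sizes, grid_positions):
--         count = 0
--         for cluster in clusters.values():
--             if all(min_row_col <= x < max_row_col and min_row_col <= y < max_row_col for x, y in cluster):
--                 count += 1
--         counts.append(count)
--     return counts
-- ===== SOURCE B (Python) =====
-- def check_grid_sizes(grid, clusters):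
--     regions = [(2, 4), (1, 5), (0, 6)]
--     counts = [0, 0, 0]
--     for cluster in clusters.values():
--         if cluster:
--             xs = [x for x, y in cluster]
--             ys = [y for x, y in cluster]
--             bbox = (min(xs), max(xs), min(ys), max(ys))
--         else:
--             bbox = None
--         for i, (lo, hi) in enumerate(regions):
--             if bbox is None or (lo <= bbox[0] and bbox[1] < hi and lo <= bbox[2] and bbox[3] < hi):
--                 counts[i] += 1
--     return counts
-- ===== Notes on version B (the rewrite author's own statement) =====
-- stated objective: alternative
-- what changed: A scans every cell of every cluster once per region (all(...) inside a region loop); B computes each cluster's bounding box once and then decides all three nested regions with constant-time interval tests, flipping the loop nesting to a single pass over clusters updating three counters.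
import Mathlib
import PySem

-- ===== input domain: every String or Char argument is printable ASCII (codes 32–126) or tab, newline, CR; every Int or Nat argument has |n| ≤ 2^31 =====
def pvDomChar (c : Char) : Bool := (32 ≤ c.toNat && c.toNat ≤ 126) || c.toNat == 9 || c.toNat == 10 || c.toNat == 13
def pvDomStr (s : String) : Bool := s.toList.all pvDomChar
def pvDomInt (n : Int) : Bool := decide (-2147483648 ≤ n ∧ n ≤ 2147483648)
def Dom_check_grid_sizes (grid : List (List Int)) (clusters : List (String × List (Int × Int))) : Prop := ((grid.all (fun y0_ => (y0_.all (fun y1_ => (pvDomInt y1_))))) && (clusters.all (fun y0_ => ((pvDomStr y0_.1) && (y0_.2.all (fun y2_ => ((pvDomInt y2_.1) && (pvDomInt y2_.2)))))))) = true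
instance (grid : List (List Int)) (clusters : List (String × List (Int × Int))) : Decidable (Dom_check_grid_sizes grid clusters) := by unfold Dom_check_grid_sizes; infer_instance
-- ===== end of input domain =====

-- B replaces A's per-region re-scan of every cell (all(...) per region) by one bounding box per
-- cluster followed by three constant-time interval tests (objective: alternative decomposition).

-- ===== PORT A =====
-- region-by-region: for each of the three windows, scan every cluster and test every cell with all(...)
def check_grid_sizes (grid : List (List Int)) (clusters : List (String × List (Int × Int))) : List Int :=
  let vals := (PySem.Dict.ofList clusters).values
  ([((2 : Int), (4 : Int)), (1, 5), (0, 6)]).foldl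
    (fun counts rc =>
      let count := vals.foldl
        (fun count cluster =>
          if cluster.all (fun p =>
              decide (rc.1 ≤ p.1) && decide (p.1 < rc.2) && (decide (rc.1 ≤ p.2) && decide (p.2 < rc.2)))
          then count + 1 else count) 0
      counts ++ [count]) []

-- ===== PORT B =====
-- bounding box of a cluster: (min x, max x, min y, max y); none for the empty cluster
def pvBBox (cluster : List (Int × Int)) : Option (Int × Int × Int × Int) :=
  match cluster with
  | [] => none
  | _ =>
    let xs := cluster.map Prod.fst
    let ys := cluster.map Prod.snd
    match PySem.List.min? xs (fun v => v), PySem.List.max? xs (fun v => v),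
          PySem.List.min? ys (fun v => v), PySem.List.max? ys (fun v => v) with
    | some a, some b, some c, some d => some (a, b, c, d)
    | _, _, _, _ => none

-- cluster-by-cluster: one bounding box, then three interval tests updating three counters
def check_grid_sizes_alt (grid : List (List Int)) (clusters : List (String × List (Int × Int))) : List Int :=
  (PySem.Dict.ofList clusters).values.foldl
    (fun counts cluster =>
      let bb := pvBBox cluster
      List.zipWith
        (fun (rc : Int × Int) c =>
          if (match bb with
              | none => true
              | some (a, b, cc, d) =>
                decide (rc.1 ≤ a) && decide (b < rc.2) && decide (rc.1 ≤ cc) && decide (d < rc.2))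
          then c + 1 else c)
        [((2 : Int), (4 : Int)), (1, 5), (0, 6)] counts)
    [0, 0, 0]

-- ===== PRECONDITION & SPEC =====
def Spec_check_grid_sizes (grid : List (List Int)) (clusters : List (String × List (Int × Int))) (out : List Int) : Prop := out = check_grid_sizes_alt grid clusters
instance (grid : List (List Int)) (clusters : List (String × List (Int × Int))) (out : List Int) : Decidable (Spec_check_grid_sizes grid clusters out) := by unfold Spec_check_grid_sizes; infer_instance

-- ===== CLAIM (what is proved, stated in full; the proofs are below) =====
def Claim_equal_check_grid_sizes : Prop := ∀ (grid : List (List Int)) (clusters : List (String × List (Int × Int))), Dom_check_grid_sizes grid clusters → Spec_check_grid_sizes grid clusters (check_grid_sizes grid clusters)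

-- ===== LEMMAS AND PROOFS =====

-- running minimum over a list versus a pointwise lower bound on every element
theorem pv_le_foldl_min {α : Type} (f : α → Int) (lo a : Int) (t : List α) :
    lo ≤ t.foldl (fun m x => min m (f x)) a ↔ (lo ≤ a ∧ ∀ x ∈ t, lo ≤ f x) := by
  induction t generalizing a with
  | nil => simp
  | cons p t ih =>
    simp only [List.foldl_cons, List.mem_cons, ih, le_min_iff]
    constructor
    · rintro ⟨⟨h1, h2⟩, h3⟩; exact ⟨h1, fun x hx => by rcases hx with rfl | hx; exact h2; exact h3 x hx⟩
    · rintro ⟨h1, h2⟩; exact ⟨⟨h1, h2 p (Or.inl rfl)⟩, fun x hx => h2 x (Or.inr hx)⟩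

-- running maximum over a list versus a pointwise upper bound on every element
theorem pv_foldl_max_lt {α : Type} (f : α → Int) (hi b : Int) (t : List α) :
    t.foldl (fun m x => max m (f x)) b < hi ↔ (b < hi ∧ ∀ x ∈ t, f x < hi) := by
  induction t generalizing b with
  | nil => simp
  | cons p t ih =>
    simp only [List.foldl_cons, List.mem_cons, ih, max_lt_iff]
    constructor
    · rintro ⟨⟨h1, h2⟩, h3⟩; exact ⟨h1, fun x hx => by rcases hx with rfl | hx; exact h2; exact h3 x hx⟩
    · rintro ⟨h1, h2⟩; exact ⟨⟨h1, h2 p (Or.inl rfl)⟩, fun x hx => h2 x (Or.inr hx)⟩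

-- the interval test on the bounding box equals A's all(...) over the cluster
theorem pv_bbox_all (lo hi : Int) (cl : List (Int × Int)) :
    (match pvBBox cl with
      | none => true
      | some (a, b, cc, d) =>
        decide (lo ≤ a) && decide (b < hi) && decide (lo ≤ cc) && decide (d < hi))
    = cl.all (fun p => decide (lo ≤ p.1) && decide (p.1 < hi) && (decide (lo ≤ p.2) && decide (p.2 < hi))) := by
  cases cl with
  | nil => simp [pvBBox]
  | cons p t =>
    simp only [pvBBox, List.map_cons, PySem.List.min?_id_cons, PySem.List.max?_id_cons,
      List.foldl_map]
    rw [Bool.eq_iff_iff]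
    simp only [Bool.and_eq_true, decide_eq_true_iff, List.all_eq_true, List.mem_cons,
      pv_le_foldl_min, pv_foldl_max_lt]
    constructor
    · rintro ⟨⟨⟨hx1, hx2⟩, hy1⟩, hy2⟩ x hx
      rcases hx with rfl | hx
      · exact ⟨⟨hx1.1, hx2.1⟩, hy1.1, hy2.1⟩
      · exact ⟨⟨hx1.2 x hx, hx2.2 x hx⟩, hy1.2 x hx, hy2.2 x hx⟩
    · intro h
      have hp := h p (Or.inl rfl)
      refine ⟨⟨⟨⟨hp.1.1, ?_⟩, hp.1.2, ?_⟩, hp.2.1, ?_⟩, hp.2.2, ?_⟩ <;>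
        intro x hx <;> have := h x (Or.inr hx) <;> tauto

-- B's one pass updating three counters equals A's three counting passes
theorem pv_counts (vals : List (List (Int × Int))) (c1 c2 c3 : Int) :
    vals.foldl
      (fun counts cluster =>
        let bb := pvBBox cluster
        List.zipWith
          (fun (rc : Int × Int) c =>
            if (match bb with
                | none => true
                | some (a, b, cc, d) =>
                  decide (rc.1 ≤ a) && decide (b < rc.2) && decide (rc.1 ≤ cc) && decide (d < rc.2))
            then c + 1 else c)
          [((2 : Int), (4 : Int)), (1, 5), (0, 6)] counts)
      [c1, c2, c3]
    = [vals.foldl (fun count cluster =>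
          if cluster.all (fun p => decide ((2:Int) ≤ p.1) && decide (p.1 < 4) && (decide ((2:Int) ≤ p.2) && decide (p.2 < 4)))
          then count + 1 else count) c1,
       vals.foldl (fun count cluster =>
          if cluster.all (fun p => decide ((1:Int) ≤ p.1) && decide (p.1 < 5) && (decide ((1:Int) ≤ p.2) && decide (p.2 < 5)))
          then count + 1 else count) c2,
       vals.foldl (fun count cluster =>
          if cluster.all (fun p => decide ((0:Int) ≤ p.1) && decide (p.1 < 6) && (decide ((0:Int) ≤ p.2) && decide (p.2 < 6)))
          then count + 1 else count) c3] := by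
  induction vals generalizing c1 c2 c3 with
  | nil => simp
  | cons cl vals ih =>
    simp only [List.foldl_cons, List.zipWith]
    rw [pv_bbox_all 2 4 cl, pv_bbox_all 1 5 cl, pv_bbox_all 0 6 cl] at *
    exact ih _ _ _

-- ===== VERDICT (by name: the statement is the Claim_ definition above) =====
theorem check_grid_sizes_spec : Claim_equal_check_grid_sizes := by
  intro grid clusters _
  show _ = _
  unfold check_grid_sizes check_grid_sizes_alt
  simp only [List.foldl_cons, List.foldl_nil, List.nil_append]
  rw [pv_counts]
  simp
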